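-- pv_equiv track=rewrite | github.com/SimonValicek/PKS | 1. zadanie/main.py | get_hexa_frame
-- ===== SOURCE A (Python) =====
-- def get_hexa_frame(string):
--     new_string = ""
--     for x in range(0, len(string), 2):
--         if (x + 2) % 32 == 0 and x != 0 and x <len(string) - 2:
--             new_string = new_string + string[x:x+2] + "\n"
--         else:
--             if x < len(string) - 2:
--                 new_string = new_string + string[x:x + 2] + " "
--             else:
--                 new_string = new_string + string[x:x + 2]
--     return new_string+"\n"
-- ===== SOURCE B (Python) =====
-- def get_hexa_frame(string):
--     chunks = [string[i:i + 2] for i in range(0, len(string), 2)]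
--     groups = [chunks[i:i + 16] for i in range(0, len(chunks), 16)]
--     return "\n".join(" ".join(g) for g in groups) + "\n"
-- ===== Notes on version B (the rewrite author's own statement) =====
-- stated objective: faster
-- what changed: Replaces A's quadratic accumulator loop (repeated string concatenation with per-iteration modulo-32/last-pair separator branching) by a branch-free chunk-group-join pipeline: split into 2-char chunks, partition into 16-chunk lines, join within lines with spaces and between lines with newlines.
import Mathlib
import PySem

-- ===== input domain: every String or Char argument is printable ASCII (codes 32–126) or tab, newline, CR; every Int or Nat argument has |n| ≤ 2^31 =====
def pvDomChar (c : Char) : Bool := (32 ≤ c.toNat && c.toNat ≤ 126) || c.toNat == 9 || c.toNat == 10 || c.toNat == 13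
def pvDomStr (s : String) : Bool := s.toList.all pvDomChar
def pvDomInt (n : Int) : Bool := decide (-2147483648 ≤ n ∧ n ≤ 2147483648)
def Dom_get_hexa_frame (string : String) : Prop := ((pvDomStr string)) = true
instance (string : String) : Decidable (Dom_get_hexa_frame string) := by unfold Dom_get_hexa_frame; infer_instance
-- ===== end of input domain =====

-- B replaces A's accumulator loop (repeated concatenation, per-iteration separator branching) by a chunk → group → join pipeline (objective: faster, measured).

-- ===== PORT A =====
def get_hexa_frame (string : String) : String :=
  let s := string.toList
  let new_string : List Char :=
    (PySem.List.pyRange 0 (s.length : Int) 2).foldl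
      (fun ns x =>
        if PySem.Int.mod (x + 2) 32 = 0 ∧ x ≠ 0 ∧ x < (s.length : Int) - 2 then
          ns ++ PySem.List.slice s (some x) (some (x + 2)) ++ ['\n']
        else if x < (s.length : Int) - 2 then
          ns ++ PySem.List.slice s (some x) (some (x + 2)) ++ [' ']
        else
          ns ++ PySem.List.slice s (some x) (some (x + 2)))
      []
  String.ofList (new_string ++ ['\n'])

-- ===== PORT B =====
def get_hexa_frame_alt (string : String) : String :=
  let s := string.toList
  let chunks : List (List Char) :=
    (PySem.List.pyRange 0 (s.length : Int) 2).map
      (fun i => PySem.List.slice s (some i) (some (i + 2)))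
  let groups : List (List (List Char)) :=
    (PySem.List.pyRange 0 (chunks.length : Int) 16).map
      (fun i => PySem.List.slice chunks (some i) (some (i + 16)))
  String.ofList (PySem.Chars.join ['\n'] (groups.map (fun g => PySem.Chars.join [' '] g)) ++ ['\n'])

-- ===== PRECONDITION & SPEC =====
def Spec_get_hexa_frame (string : String) (out : String) : Prop := out = get_hexa_frame_alt string
instance (string : String) (out : String) : Decidable (Spec_get_hexa_frame string out) := by unfold Spec_get_hexa_frame; infer_instance

-- ===== CLAIM (what is proved, stated in full; the proofs are below) =====
def Claim_equal_get_hexa_frame : Prop := ∀ (string : String), Dom_get_hexa_frame string → Spec_get_hexa_frame string (get_hexa_frame string)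

-- ===== LEMMAS AND PROOFS =====

-- 2-char chunks of a list (proof-side mirror of both ports' chunking).
def pvGrp2 {α : Type} : List α → List (List α)
  | [] => []
  | [a] => [[a]]
  | a :: b :: t => [a, b] :: pvGrp2 t

-- 16-element groups of a list.
def pvGrp16 {α : Type} : List α → List (List α)
  | [] => []
  | x :: t => ((x :: t).take 16) :: pvGrp16 (t.drop 15)
  termination_by l => l.length
  decreasing_by simp

theorem pvGrp2_eq {α : Type} (l : List α) :
    (List.range ((l.length + 1) / 2)).map (fun k => (l.drop (2 * k)).take 2) = pvGrp2 l := by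
  induction l using pvGrp2.induct with
  | case1 => simp [pvGrp2]
  | case2 a => simp [pvGrp2, List.range_succ]
  | case3 a b t ih =>
    have hm : ((a :: b :: t).length + 1) / 2 = (t.length + 1) / 2 + 1 := by
      simp; omega
    rw [hm, List.range_succ_eq_map, List.map_cons, List.map_map]
    simp only [pvGrp2]
    congr 1

theorem pvGrp16_eq {α : Type} (l : List α) :
    (List.range ((l.length + 15) / 16)).map (fun k => (l.drop (16 * k)).take 16) = pvGrp16 l := by
  induction l using pvGrp16.induct with
  | case1 => simp [pvGrp16]
  | case2 x t ih =>
    have hm : ((x :: t).length + 15) / 16 = ((t.drop 15).length + 15) / 16 + 1 := by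
      simp; omega
    rw [hm, List.range_succ_eq_map, List.map_cons, List.map_map]
    rw [pvGrp16]
    congr 1
    rw [← ih]
    apply List.map_congr_left
    intro k hk
    have h1 : 16 * Nat.succ k = (15 + 16 * k) + 1 := by omega
    simp only [Function.comp_apply, h1, List.drop_succ_cons, List.drop_drop]

-- one display line: chunks joined by spaces, followed by a terminal e
theorem pvSepline (h : List (List Char)) (e : List Char) (hne : h ≠ []) :
    (List.range h.length).flatMap
      (fun k => h.getD k [] ++ if k + 1 < h.length then [' '] else e)
    = PySem.Chars.join [' '] h ++ e := by
  induction h with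
  | nil => exact absurd rfl hne
  | cons c t ih =>
    cases t with
    | nil => simp [PySem.Chars.join_singleton, List.range_succ]
    | cons d t' =>
      rw [List.length_cons, List.range_succ_eq_map, List.flatMap_cons, List.flatMap_map]
      rw [PySem.Chars.join_cons_cons]
      have h0 : (c :: d :: t').getD 0 [] ++ (if 0 + 1 < (d :: t').length + 1 then [' '] else e)
          = c ++ [' '] := by simp
      have hfun : (fun a => (c :: d :: t').getD (Nat.succ a) [] ++ if (Nat.succ a) + 1 < (d :: t').length + 1 then [' '] else e)
          = (fun k => (d :: t').getD k [] ++ if k + 1 < (d :: t').length then [' '] else e) := by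
        funext k
        simp only [List.getD_cons_succ]
        congr 1
        simp [Nat.succ_eq_add_one]
      rw [hfun, ih (by simp), h0]
      simp

-- the whole frame, as a function of the chunk list
theorem pvMain (cs : List (List Char)) :
    (List.range cs.length).flatMap
      (fun k => cs.getD k [] ++
        (if (k + 1) % 16 = 0 ∧ k + 1 < cs.length then ['\n']
         else if k + 1 < cs.length then [' '] else []))
    = PySem.Chars.join ['\n'] ((pvGrp16 cs).map (fun g => PySem.Chars.join [' '] g)) := by
  induction cs using pvGrp16.induct with
  | case1 => simp [pvGrp16, PySem.Chars.join_nil]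
  | case2 x t ih =>
    by_cases hbig : 16 ≤ t.length
    · -- at least two groups
      have hm : (x :: t).length = t.length + 1 := by simp
      have hcl : (t.drop 15).length = t.length - 15 := by simp
      have hr : List.range (x :: t).length
          = List.range 16 ++ (List.range ((t.drop 15).length)).map (16 + ·) := by
        have hl : (x :: t).length = 16 + (t.drop 15).length := by
          rw [List.length_cons, List.length_drop]; omega
        rw [hl, List.range_add]
      rw [hr, List.flatMap_append, List.flatMap_map]
      -- part 1: the first (full) display line
      have hlen16 : ((x :: t).take 16).length = 16 := by simp; omega
      have hc1 : ∀ k ∈ List.range 16,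
          (x :: t).getD k [] ++
            (if (k + 1) % 16 = 0 ∧ k + 1 < (x :: t).length then ['\n']
             else if k + 1 < (x :: t).length then [' '] else [])
          = ((x :: t).take 16).getD k [] ++
            (if k + 1 < 16 then [' '] else ['\n']) := by
        intro k hk
        rw [List.mem_range] at hk
        have hget : ((x :: t).take 16).getD k [] = (x :: t).getD k [] := by
          rw [List.getD_eq_getElem?_getD, List.getD_eq_getElem?_getD,
            List.getElem?_take, if_pos hk]
        rw [← hget]
        congr 1
        by_cases hc : k + 1 < 16
        · rw [if_neg (by omega), if_pos (by omega), if_pos hc]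
        · rw [if_pos (by constructor <;> omega), if_neg hc]
      have hp1 := pvSepline ((x :: t).take 16) ['\n']
        (by intro h; rw [h] at hlen16; simp at hlen16)
      rw [hlen16] at hp1
      rw [List.flatMap_congr hc1, hp1]
      -- part 2: the remaining lines
      have hc2 : ∀ k ∈ List.range ((t.drop 15).length),
          (x :: t).getD (16 + k) [] ++
            (if (16 + k + 1) % 16 = 0 ∧ 16 + k + 1 < (x :: t).length then ['\n']
             else if 16 + k + 1 < (x :: t).length then [' '] else [])
          = (t.drop 15).getD k [] ++
            (if (k + 1) % 16 = 0 ∧ k + 1 < (t.drop 15).length then ['\n']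
             else if k + 1 < (t.drop 15).length then [' '] else []) := by
        intro k _
        have hget : (x :: t).getD (16 + k) [] = (t.drop 15).getD k [] := by
          have hd : (x :: t).drop 16 = t.drop 15 := by
            simp
          rw [List.getD_eq_getElem?_getD, List.getD_eq_getElem?_getD, ← hd,
            List.getElem?_drop]
        rw [hget]
        congr 1
        have e1 : (16 + k + 1) % 16 = (k + 1) % 16 := by omega
        have e2 : (16 + k + 1 < (x :: t).length) ↔ (k + 1 < (t.drop 15).length) := by
          rw [hm, hcl]; omega
        rw [e1]
        by_cases hp : (k + 1) % 16 = 0 ∧ k + 1 < (t.drop 15).length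
        · rw [if_pos ⟨hp.1, e2.mpr hp.2⟩, if_pos hp]
        · rw [if_neg (by rw [e2]; exact hp), if_neg hp]
          by_cases hq : k + 1 < (t.drop 15).length
          · rw [if_pos (e2.mpr hq), if_pos hq]
          · rw [if_neg (by rw [e2]; exact hq), if_neg hq]
      rw [List.flatMap_congr hc2, ih]
      have hne' : t.drop 15 ≠ [] := by
        intro h; rw [h] at hcl; simp at hcl; omega
      obtain ⟨y, t', hy⟩ := List.exists_cons_of_ne_nil hne'
      rw [show pvGrp16 (x :: t) = ((x :: t).take 16) :: pvGrp16 (t.drop 15) from by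
        rw [pvGrp16]]
      rw [hy, pvGrp16, List.map_cons, List.map_cons, List.map_cons,
        PySem.Chars.join_cons_cons]
    · -- a single display line
      have hdrop : t.drop 15 = [] := List.drop_eq_nil_of_le (by omega)
      rw [pvGrp16, hdrop, pvGrp16, List.map_cons, List.map_nil,
        PySem.Chars.join_singleton]
      have htake : (x :: t).take 16 = x :: t := List.take_of_length_le (by simp; omega)
      rw [htake]
      have hc : ∀ k ∈ List.range (x :: t).length,
          (x :: t).getD k [] ++
            (if (k + 1) % 16 = 0 ∧ k + 1 < (x :: t).length then ['\n']
             else if k + 1 < (x :: t).length then [' '] else [])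
          = (x :: t).getD k [] ++
            (if k + 1 < (x :: t).length then [' '] else ([] : List Char)) := by
        intro k hk
        rw [List.mem_range] at hk
        congr 1
        rw [if_neg (by simp at hk ⊢; omega)]
      rw [List.flatMap_congr hc, pvSepline (x :: t) [] (by simp)]
      simp

-- B's 2-char chunk comprehension is pvGrp2
theorem pvChunks (s : List Char) :
    (PySem.List.pyRange 0 (s.length : Int) 2).map
      (fun i => PySem.List.slice s (some i) (some (i + 2))) = pvGrp2 s := by
  rw [PySem.List.pyRange_of_pos 0 (s.length : Int) (by norm_num), List.map_map]
  have hM : (if (0:Int) < (s.length : Int) then (((s.length : Int) - 0 + 2 - 1) / 2).toNat else 0)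
      = (s.length + 1) / 2 := by
    split_ifs with h <;> omega
  rw [hM, ← pvGrp2_eq]
  apply List.map_congr_left
  intro k hk
  simp only [Function.comp_apply, zero_add]
  rw [show (2 * (k : Int)) = ((2 * k : Nat) : Int) from by push_cast; ring,
    show ((2 * k : Nat) : Int) + 2 = ((2 * k + 2 : Nat) : Int) from by push_cast; ring,
    PySem.List.slice_natCast]
  congr 1
  omega

-- B's 16-chunk group comprehension is pvGrp16
theorem pvGroups (cs : List (List Char)) :
    (PySem.List.pyRange 0 (cs.length : Int) 16).map
      (fun i => PySem.List.slice cs (some i) (some (i + 16))) = pvGrp16 cs := by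
  rw [PySem.List.pyRange_of_pos 0 (cs.length : Int) (by norm_num), List.map_map]
  have hM : (if (0:Int) < (cs.length : Int) then (((cs.length : Int) - 0 + 16 - 1) / 16).toNat else 0)
      = (cs.length + 15) / 16 := by
    split_ifs with h <;> omega
  rw [hM, ← pvGrp16_eq]
  apply List.map_congr_left
  intro k hk
  simp only [Function.comp_apply, zero_add]
  rw [show (16 * (k : Int)) = ((16 * k : Nat) : Int) from by push_cast; ring,
    show ((16 * k : Nat) : Int) + 16 = ((16 * k + 16 : Nat) : Int) from by push_cast; ring,
    PySem.List.slice_natCast]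
  congr 1
  omega

-- A's accumulator loop, computed as a flatMap and reduced to pvMain's form
theorem pvA_list (s : List Char) :
    (PySem.List.pyRange 0 (s.length : Int) 2).foldl
      (fun ns x =>
        if PySem.Int.mod (x + 2) 32 = 0 ∧ x ≠ 0 ∧ x < (s.length : Int) - 2 then
          ns ++ PySem.List.slice s (some x) (some (x + 2)) ++ ['\n']
        else if x < (s.length : Int) - 2 then
          ns ++ PySem.List.slice s (some x) (some (x + 2)) ++ [' ']
        else
          ns ++ PySem.List.slice s (some x) (some (x + 2)))
      []
    = PySem.Chars.join ['\n'] ((pvGrp16 (pvGrp2 s)).map (fun g => PySem.Chars.join [' '] g)) := by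
  have hstep : (fun (ns : List Char) (x : Int) =>
        if PySem.Int.mod (x + 2) 32 = 0 ∧ x ≠ 0 ∧ x < (s.length : Int) - 2 then
          ns ++ PySem.List.slice s (some x) (some (x + 2)) ++ ['\n']
        else if x < (s.length : Int) - 2 then
          ns ++ PySem.List.slice s (some x) (some (x + 2)) ++ [' ']
        else
          ns ++ PySem.List.slice s (some x) (some (x + 2)))
      = (fun ns x => ns ++ (PySem.List.slice s (some x) (some (x + 2)) ++
          (if PySem.Int.mod (x + 2) 32 = 0 ∧ x ≠ 0 ∧ x < (s.length : Int) - 2 then ['\n']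
           else if x < (s.length : Int) - 2 then [' '] else []))) := by
    funext ns x
    split_ifs <;> simp
  rw [hstep, PySem.List.foldl_append_eq_flatMap, List.nil_append]
  rw [PySem.List.pyRange_of_pos 0 (s.length : Int) (by norm_num), List.flatMap_map]
  have hM : (if (0:Int) < (s.length : Int) then (((s.length : Int) - 0 + 2 - 1) / 2).toNat else 0)
      = (s.length + 1) / 2 := by
    split_ifs with h <;> omega
  rw [hM]
  have hlen : (pvGrp2 s).length = (s.length + 1) / 2 := by
    rw [← pvGrp2_eq]; simp
  have hcong : ∀ k ∈ List.range ((s.length + 1) / 2),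
      PySem.List.slice s (some (0 + 2 * (k : Int))) (some (0 + 2 * (k : Int) + 2)) ++
        (if PySem.Int.mod (0 + 2 * (k : Int) + 2) 32 = 0 ∧ (0 + 2 * (k : Int)) ≠ 0 ∧
              (0 + 2 * (k : Int)) < (s.length : Int) - 2 then ['\n']
         else if (0 + 2 * (k : Int)) < (s.length : Int) - 2 then [' '] else [])
      = (pvGrp2 s).getD k [] ++
        (if (k + 1) % 16 = 0 ∧ k + 1 < (pvGrp2 s).length then ['\n']
         else if k + 1 < (pvGrp2 s).length then [' '] else []) := by
    intro k hk
    rw [List.mem_range] at hk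
    have hget : (pvGrp2 s).getD k [] = (s.drop (2 * k)).take 2 := by
      rw [← pvGrp2_eq, List.getD_eq_getElem?_getD, List.getElem?_map,
        List.getElem?_range hk]
      rfl
    have hslice : PySem.List.slice s (some (0 + 2 * (k : Int))) (some (0 + 2 * (k : Int) + 2))
        = (s.drop (2 * k)).take 2 := by
      simp only [zero_add]
      rw [show (2 * (k : Int)) = ((2 * k : Nat) : Int) from by push_cast; ring,
        show ((2 * k : Nat) : Int) + 2 = ((2 * k + 2 : Nat) : Int) from by push_cast; ring,
        PySem.List.slice_natCast]
      congr 1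
      omega
    rw [hslice, hget]
    congr 1
    have e32 : PySem.Int.mod (0 + 2 * (k : Int) + 2) 32 = (((2 * k + 2) % 32 : Nat) : Int) := by
      rw [show (0 + 2 * (k : Int) + 2) = ((2 * k + 2 : Nat) : Int) from by push_cast; ring,
        show (32 : Int) = ((32 : Nat) : Int) from by norm_num,
        PySem.Int.mod_natCast]
    have h1 : (PySem.Int.mod (0 + 2 * (k : Int) + 2) 32 = 0 ∧ (0 + 2 * (k : Int)) ≠ 0 ∧
          (0 + 2 * (k : Int)) < (s.length : Int) - 2)
        ↔ ((k + 1) % 16 = 0 ∧ k + 1 < (pvGrp2 s).length) := by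
      rw [e32, hlen]
      omega
    have h2 : ((0 + 2 * (k : Int)) < (s.length : Int) - 2) ↔ (k + 1 < (pvGrp2 s).length) := by
      rw [hlen]
      omega
    by_cases hp : (k + 1) % 16 = 0 ∧ k + 1 < (pvGrp2 s).length
    · rw [if_pos (h1.mpr hp), if_pos hp]
    · rw [if_neg (by rw [h1]; exact hp), if_neg hp]
      by_cases hq : k + 1 < (pvGrp2 s).length
      · rw [if_pos (h2.mpr hq), if_pos hq]
      · rw [if_neg (by rw [h2]; exact hq), if_neg hq]
  rw [List.flatMap_congr hcong, show (s.length + 1) / 2 = (pvGrp2 s).length from hlen.symm,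
    pvMain (pvGrp2 s)]

-- ===== VERDICT (by name: the statement is the Claim_ definition above) =====
theorem get_hexa_frame_spec : Claim_equal_get_hexa_frame := by
  unfold Claim_equal_get_hexa_frame
  intro string _
  unfold Spec_get_hexa_frame get_hexa_frame get_hexa_frame_alt
  dsimp only
  rw [pvChunks string.toList, pvGroups (pvGrp2 string.toList), pvA_list string.toList]
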